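-- pv_equiv track=rewrite | github.com/Jonathana1106/PythonITP | Quices/JonathanGuzmanAraya#6.py | correcta
-- ===== SOURCE A (Python) =====
-- def correcta(lista, i, n): # Se crea la funcion correcta.
--     if i >= len(lista): # Condicion de parada.
--         return True # Retorna "True".
--     elif len(lista[i]) == 3: # Evalua que siempre el contenido de las sublistas sea 3, ya que necesita 3 elementos.
--         if isinstance((lista[i][n]), int): # Se evalua que el elemento 'n' sea un numero entero.
--             return correcta(lista, i+1, n) # SI cumple lo anterior aumenta el 'i' en 1.
--         else: # Sino retorna "False".
--             return False
--     else: # Sino retorna "False".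
--         return False
-- ===== SOURCE B (Python) =====
-- def correcta(lista, i, n):
--     return all(len(sub) == 3 and isinstance(sub[n], int) for sub in lista[i:])
-- ===== Notes on version B (the rewrite author's own statement) =====
-- stated objective: idiomatic
-- what changed: Replaces the index-accumulator recursion by a single all(...) generator over the tail slice lista[i:], the way an experienced Python developer would write the check.
-- outside the precondition, e.g. on correcta([[1], [1, 2, 3]], -1, 0): A returns False, B returns True; on correcta([[1, 2, 3]], 0, 5): A raises IndexError, B raises IndexError
import Mathlib
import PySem

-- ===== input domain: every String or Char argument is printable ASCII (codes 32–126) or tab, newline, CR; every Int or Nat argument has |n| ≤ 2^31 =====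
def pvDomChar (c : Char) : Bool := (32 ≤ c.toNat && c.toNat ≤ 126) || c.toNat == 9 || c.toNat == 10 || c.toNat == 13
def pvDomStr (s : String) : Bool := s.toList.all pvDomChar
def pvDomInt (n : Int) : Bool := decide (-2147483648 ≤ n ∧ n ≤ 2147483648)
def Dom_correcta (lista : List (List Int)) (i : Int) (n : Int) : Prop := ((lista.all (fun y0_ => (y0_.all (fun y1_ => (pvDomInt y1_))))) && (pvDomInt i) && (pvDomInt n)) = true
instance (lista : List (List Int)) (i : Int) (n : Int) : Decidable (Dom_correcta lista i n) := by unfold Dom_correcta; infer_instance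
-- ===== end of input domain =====

-- B replaces A's index-accumulator recursion by a single all(...) pass over the tail slice lista[i:] (idiomatic; same cost).

-- ===== PORT A =====
-- literal transliteration of the Python recursion; pyGet? none = Python IndexError (excluded by Pre_)
def correcta (lista : List (List Int)) (i : Int) (n : Int) : Bool :=
  if (lista.length : Int) ≤ i then true
  else
    match PySem.List.pyGet? lista i with
    | none => false   -- Python raises IndexError here (i < -len); outside Pre_
    | some sub =>
      if sub.length = 3 then
        match PySem.List.pyGet? sub n with
        | some _ => correcta lista (i + 1) n   -- isinstance(lista[i][n], int) is True for an Int element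
        | none => false   -- Python raises IndexError here; outside Pre_
      else false
termination_by ((lista.length : Int) - i).toNat
decreasing_by simp_wf; omega

-- ===== PORT B =====
def correcta_alt (lista : List (List Int)) (i : Int) (n : Int) : Bool :=
  (PySem.List.slice lista (some i) none).all
    (fun sub => sub.length == 3 && (PySem.List.pyGet? sub n).isSome)

-- ===== PRECONDITION & SPEC =====
-- Pre_ excludes (a) inputs where A raises IndexError: i < -len(lista), or lista[i] a length-3
-- sublist while n is outside [-3,3) (then lista[i][n] raises); and (b) negative start indices i,
-- on which A's recursion wraps to lista[len+i..] and then re-scans lista[0..] while B reads the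
-- slice lista[i:] — both readings of a negative start index are defensible and neither is specified.
def Pre_correcta (lista : List (List Int)) (i : Int) (n : Int) : Prop :=
  0 ≤ i ∧ ((PySem.List.pyGet? lista i).map List.length = some 3 → (-3 ≤ n ∧ n < 3))
instance (lista : List (List Int)) (i : Int) (n : Int) : Decidable (Pre_correcta lista i n) := by unfold Pre_correcta; infer_instance

def pvWitness_correcta : List (List Int) × Int × Int := ([[1, 2, 3], [4, 5, 6]], 0, 1)

def Spec_correcta (lista : List (List Int)) (i : Int) (n : Int) (out : Bool) : Prop := out = correcta_alt lista i n
instance (lista : List (List Int)) (i : Int) (n : Int) (out : Bool) : Decidable (Spec_correcta lista i n out) := by unfold Spec_correcta; infer_instance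

-- ===== CLAIM (what is proved, stated in full; the proofs are below) =====
def Claim_equal_correcta : Prop := ∀ (lista : List (List Int)) (i : Int) (n : Int), Dom_correcta lista i n → Pre_correcta lista i n → Spec_correcta lista i n (correcta lista i n)

-- ===== LEMMAS AND PROOFS =====

-- For a nonnegative start index, A's recursion computes the all-check over the dropped tail.
lemma correcta_eq_all_drop (lista : List (List Int)) (n : Int) :
    ∀ (k : Nat) (i : Int), 0 ≤ i → ((lista.length : Int) - i).toNat = k →
      correcta lista i n =
        (lista.drop i.toNat).all (fun sub => sub.length == 3 && (PySem.List.pyGet? sub n).isSome) := by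
  intro k
  induction k with
  | zero =>
    intro i hi hk
    have hlen : (lista.length : Int) ≤ i := by omega
    have hdrop : lista.drop i.toNat = [] := by
      apply List.drop_eq_nil_of_le; omega
    rw [correcta, if_pos hlen, hdrop]
    rfl
  | succ k ih =>
    intro i hi hk
    have hlt : i < (lista.length : Int) := by omega
    have hltn : i.toNat < lista.length := by omega
    have hget : PySem.List.pyGet? lista i = some lista[i.toNat] := by
      have h1 : PySem.List.pyGet? lista i = lista[i.toNat]? := by
        conv_lhs => rw [show i = ((i.toNat : Nat) : Int) by omega]
        exact PySem.List.pyGet?_natCast lista i.toNat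
      rw [h1]; exact List.getElem?_eq_getElem hltn
    rw [correcta, if_neg (by omega), hget, List.drop_eq_getElem_cons hltn, List.all_cons]
    dsimp only
    by_cases h3 : lista[i.toNat].length = 3
    · rw [if_pos h3]
      cases hsn : PySem.List.pyGet? lista[i.toNat] n with
      | none => simp [h3]
      | some v =>
        have hstep : correcta lista (i + 1) n =
            (lista.drop (i + 1).toNat).all
              (fun sub => sub.length == 3 && (PySem.List.pyGet? sub n).isSome) :=
          ih (i + 1) (by omega) (by omega)
        have htn : (i + 1).toNat = i.toNat + 1 := by omega
        simp [hstep, htn, h3]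
    · rw [if_neg h3]
      simp [h3]

-- ===== VERDICT (by name: the statement is the Claim_ definition above) =====
theorem correcta_spec : Claim_equal_correcta := by
  intro lista i n _hdom hpre
  unfold Spec_correcta correcta_alt
  rw [PySem.List.slice_from lista hpre.1]
  exact correcta_eq_all_drop lista n ((lista.length : Int) - i).toNat i hpre.1 rfl
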